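-- pv_equiv track=rewrite | github.com/documenteinaer/ad-server | compare_signatures_ble.py | merge_fingerprints_ble
-- ===== SOURCE A (Python) =====
-- import copy
--
-- def merge_fingerprints_ble(flist):
--     if len(flist) == 1:
--         return flist[0]
--     fingerprint = copy.deepcopy(flist[0])
--     for f2 in copy.deepcopy(flist[1:]):
--         if not "ble" in f2.keys():
--             continue
--         for mac in f2["ble"].keys():
--             if not mac in fingerprint["ble"].keys():
--                 fingerprint["ble"][mac] = f2["ble"][mac]
--             else:
--                 fingerprint["ble"][mac]['rssi'].extend(f2["ble"][mac]['rssi'])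
--             fingerprint["ble"][mac]['rssi'].sort()
--     return fingerprint
-- ===== SOURCE B (Python) =====
-- import copy
--
--
-- def merge_fingerprints_ble(flist):
--     # Aggregate every later fingerprint's BLE table into one dict keyed by mac,
--     # then apply that aggregate to (a deep copy of) the first fingerprint.
--     agg = {}
--     for f2 in flist[1:]:
--         if "ble" not in f2:
--             continue
--         for mac in f2["ble"]:
--             sub = f2["ble"][mac]
--             if mac not in agg:
--                 agg[mac] = copy.deepcopy(sub)
--             else:
--                 agg[mac]["rssi"].extend(sub["rssi"])
--     if len(flist) == 1:
--         return flist[0]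
--     result = copy.deepcopy(flist[0])
--     for mac, sub in agg.items():
--         ble = result["ble"]
--         if mac not in ble:
--             ble[mac] = sub
--         else:
--             ble[mac]["rssi"].extend(sub["rssi"])
--         ble[mac]["rssi"].sort()
--     return result
-- ===== Notes on version B (the rewrite author's own statement) =====
-- stated objective: alternative
-- what changed: B first folds all later fingerprints into a single per-mac aggregate dict (concatenating rssi lists, no sorting) and then applies that aggregate to a copy of the first fingerprint with one sort per merged mac, instead of A's interleaved merge-and-resort of the running result after every single mac occurrence.
import Mathlib
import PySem

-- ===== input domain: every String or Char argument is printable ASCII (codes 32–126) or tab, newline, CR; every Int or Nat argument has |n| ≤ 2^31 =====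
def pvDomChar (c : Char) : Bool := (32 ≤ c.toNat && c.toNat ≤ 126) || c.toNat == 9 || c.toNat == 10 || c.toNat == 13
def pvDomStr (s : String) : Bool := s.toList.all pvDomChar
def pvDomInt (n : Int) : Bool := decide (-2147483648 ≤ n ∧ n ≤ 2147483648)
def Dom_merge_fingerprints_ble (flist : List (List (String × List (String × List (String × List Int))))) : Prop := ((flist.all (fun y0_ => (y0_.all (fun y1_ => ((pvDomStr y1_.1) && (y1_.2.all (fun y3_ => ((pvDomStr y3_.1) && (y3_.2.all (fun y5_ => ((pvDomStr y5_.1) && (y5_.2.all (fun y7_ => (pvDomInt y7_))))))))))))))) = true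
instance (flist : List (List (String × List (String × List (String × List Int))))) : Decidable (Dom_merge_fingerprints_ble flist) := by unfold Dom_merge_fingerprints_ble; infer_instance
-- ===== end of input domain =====

-- B aggregates all later fingerprints into one per-mac table first and then applies it to the
-- first fingerprint with a single sort per merged mac, instead of A's interleaved
-- merge-and-resort of the running result at every mac occurrence (objective: alternative).

-- Python dict primitives on association lists, via PySem.Dict
-- (first-match lookup, overwrite keeps position, new keys append).
def dget {ν : Type} (d : List (String × ν)) (k : String) (dflt : ν) : ν :=
  (PySem.Dict.mk d).getD k dflt
def dhas {ν : Type} (d : List (String × ν)) (k : String) : Bool :=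
  (PySem.Dict.mk d).contains k
def dset {ν : Type} (d : List (String × ν)) (k : String) (v : ν) : List (String × ν) :=
  ((PySem.Dict.mk d).insert k v).items
def dkeys {ν : Type} (d : List (String × ν)) : List String :=
  (PySem.Dict.mk d).keys

-- ===== PORT A =====
def merge_fingerprints_ble (flist : List (List (String × List (String × List (String × List Int))))) : List (String × List (String × List (String × List Int))) :=
  if flist.length == 1 then flist.headD [] else
  match flist with
  | [] => []      -- Python raises IndexError here (flist[0]); excluded by Pre_
  | f0 :: rest =>
    rest.foldl (fun fp f2 =>
      if dhas f2 "ble" = false then fp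
      else
        (dkeys (dget f2 "ble" [])).foldl (fun fp mac =>
          let fpble := dget fp "ble" []     -- "ble" missing is a KeyError: excluded by Pre_
          let fpble1 :=
            if dhas fpble mac = false then
              dset fpble mac (dget (dget f2 "ble" []) mac [])
            else
              dset fpble mac
                (dset (dget fpble mac []) "rssi"
                  (dget (dget fpble mac []) "rssi" [] ++
                   dget (dget (dget f2 "ble" []) mac []) "rssi" []))
          let sub := dget fpble1 mac []
          let fpble2 := dset fpble1 mac
            (dset sub "rssi" (PySem.List.sorted (dget sub "rssi" []) (fun x => x) false))
          dset fp "ble" fpble2) fp) f0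

-- ===== PORT B =====
def merge_fingerprints_ble_alt (flist : List (List (String × List (String × List (String × List Int))))) : List (String × List (String × List (String × List Int))) :=
  let agg := (flist.drop 1).foldl (fun agg f2 =>
    if dhas f2 "ble" = false then agg
    else
      (dkeys (dget f2 "ble" [])).foldl (fun agg mac =>
        let sub := dget (dget f2 "ble" []) mac []
        if dhas agg mac = false then dset agg mac sub
        else dset agg mac
          (dset (dget agg mac []) "rssi"
            (dget (dget agg mac []) "rssi" [] ++ dget sub "rssi" []))) agg) []
  if flist.length == 1 then flist.headD [] else
  match flist with
  | [] => []      -- Python raises IndexError here (flist[0]); excluded by Pre_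
  | f0 :: _ =>
    agg.foldl (fun res p =>
      let rble := dget res "ble" []
      let rble1 :=
        if dhas rble p.1 = false then dset rble p.1 p.2
        else dset rble p.1
          (dset (dget rble p.1 []) "rssi"
            (dget (dget rble p.1 []) "rssi" [] ++ dget p.2 "rssi" []))
      let sub := dget rble1 p.1 []
      dset res "ble" (dset rble1 p.1
        (dset sub "rssi" (PySem.List.sorted (dget sub "rssi" []) (fun x => x) false)))) f0

-- ===== PRECONDITION & SPEC =====
-- Pre_: exactly the inputs on which A returns normally: flist nonempty (else IndexError), and
-- unless flist is a singleton, every merged mac of a later fingerprint has an "rssi" list, the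
-- first fingerprint has a "ble" table whenever some later mac is merged, and a first-fingerprint
-- entry for a merged mac has an "rssi" list — otherwise A raises KeyError.
def Pre_merge_fingerprints_ble (flist : List (List (String × List (String × List (String × List Int))))) : Prop :=
  (!flist.isEmpty &&
    (flist.length == 1 ||
      (flist.drop 1).all (fun f2 =>
        !dhas f2 "ble" ||
        (dkeys (dget f2 "ble" [])).all (fun mac =>
          dhas (flist.headD []) "ble" &&
          dhas (dget (dget f2 "ble" []) mac []) "rssi" &&
          (!dhas (dget (flist.headD []) "ble" []) mac ||
            dhas (dget (dget (flist.headD []) "ble" []) mac []) "rssi"))))) = true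
instance (flist : List (List (String × List (String × List (String × List Int))))) : Decidable (Pre_merge_fingerprints_ble flist) := by unfold Pre_merge_fingerprints_ble; infer_instance

def pvWitness_merge_fingerprints_ble : (List (List (String × List (String × List (String × List Int))))) :=
  [[("ble", [("m", [("rssi", [3, 1])])])], [("ble", [("m", [("rssi", [2])])]), ("x", [])]]

def Spec_merge_fingerprints_ble (flist : List (List (String × List (String × List (String × List Int))))) (out : List (String × List (String × List (String × List Int)))) : Prop := out = merge_fingerprints_ble_alt flist
instance (flist : List (List (String × List (String × List (String × List Int))))) (out : List (String × List (String × List (String × List Int)))) : Decidable (Spec_merge_fingerprints_ble flist out) := by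
  unfold Spec_merge_fingerprints_ble
  letI d1 : DecidableEq (List Int) := List.hasDecEq
  letI d2 : DecidableEq (String × List Int) := instDecidableEqProd
  letI d3 : DecidableEq (List (String × List Int)) := List.hasDecEq
  letI d4 : DecidableEq (String × List (String × List Int)) := instDecidableEqProd
  letI d5 : DecidableEq (List (String × List (String × List Int))) := List.hasDecEq
  letI d6 : DecidableEq (String × List (String × List (String × List Int))) := instDecidableEqProd
  letI d7 : DecidableEq (List (String × List (String × List (String × List Int)))) := List.hasDecEq
  exact d7 _ _

-- ===== CLAIM (what is proved, stated in full; the proofs are below) =====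
def Claim_equal_merge_fingerprints_ble : Prop := ∀ (flist : List (List (String × List (String × List (String × List Int))))), Dom_merge_fingerprints_ble flist → Pre_merge_fingerprints_ble flist → Spec_merge_fingerprints_ble flist (merge_fingerprints_ble flist)

-- ===== LEMMAS AND PROOFS =====

-- primitive association-list lemmas
theorem mk_items {κ ν : Type} (x : PySem.Dict κ ν) : PySem.Dict.mk (PySem.Dict.items x) = x := rfl

theorem dget_dset {ν : Type} (d : List (String × ν)) (k k' : String) (v : ν) (dflt : ν) :
    dget (dset d k v) k' dflt = if k' = k then v else dget d k' dflt := by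
  simp [dget, dset, mk_items, PySem.Dict.getD_insert]

theorem dhas_dset {ν : Type} (d : List (String × ν)) (k k' : String) (v : ν) :
    dhas (dset d k v) k' = (k' == k || dhas d k') := by
  simp [dhas, dset, mk_items, PySem.Dict.contains_insert]

theorem dset_dset_self {ν : Type} (d : List (String × ν)) (k : String) (v w : ν) :
    dset (dset d k v) k w = dset d k w := by
  simp [dset, mk_items, PySem.Dict.insert_insert_self]

theorem dget_cons {ν : Type} (a : String) (b : ν) (t : List (String × ν)) (k : String) (dflt : ν) :
    dget ((a, b) :: t) k dflt = if a = k then b else dget t k dflt := by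
  by_cases h : a = k
  · simp [dget, PySem.Dict.getD, PySem.Dict.get?, List.find?, h]
  · simp [dget, PySem.Dict.getD, PySem.Dict.get?, List.find?, h, beq_false_of_ne h]

theorem dhas_cons {ν : Type} (a : String) (b : ν) (t : List (String × ν)) (k : String) :
    dhas ((a, b) :: t) k = (a = k || dhas t k) := by
  by_cases h : a = k
  · simp [dhas, PySem.Dict.contains, h]
  · simp [dhas, PySem.Dict.contains, h, beq_false_of_ne h]

theorem dhas_append {ν : Type} (l1 l2 : List (String × ν)) (k : String) :
    dhas (l1 ++ l2) k = (dhas l1 k || dhas l2 k) := by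
  simp [dhas, PySem.Dict.contains, List.any_append]

theorem dset_eq {ν : Type} (d : List (String × ν)) (k : String) (v : ν) :
    dset d k v = if dhas d k then d.map (fun p => if p.1 == k then (k, v) else p) else d ++ [(k, v)] := by
  simp only [dset, dhas, PySem.Dict.insert]
  split_ifs <;> rfl

theorem keyfst {ν : Type} (k : String) (v : ν) (p : String × ν) :
    (if p.1 == k then (k, v) else p).1 = p.1 := by
  by_cases h : p.1 = k
  · simp [h]
  · simp [beq_false_of_ne h]

theorem dhas_map_set {ν : Type} (d : List (String × ν)) (k k' : String) (v : ν) :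
    dhas (d.map (fun p => if p.1 == k then (k, v) else p)) k' = dhas d k' := by
  simp only [dhas, PySem.Dict.contains, List.any_map, Function.comp_def]
  congr 1
  funext p
  rw [keyfst]

theorem dhas_iff_mem {ν : Type} (d : List (String × ν)) (k : String) :
    dhas d k = true ↔ k ∈ d.map Prod.fst := by
  rw [dhas, PySem.Dict.contains_eq_decide_mem_keys]
  simp [PySem.Dict.keys]

theorem map_setfn_of_not_mem {ν : Type} (l : List (String × ν)) (k : String) (v : ν)
    (h : k ∉ l.map Prod.fst) :
    l.map (fun p => if p.1 == k then (k, v) else p) = l := by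
  induction l with
  | nil => rfl
  | cons p t ih =>
    rw [List.map_cons] at h
    have hk : p.1 ≠ k := by
      intro e
      exact h (by rw [← e]; exact List.mem_cons_self ..)
    have ht : k ∉ t.map Prod.fst := fun hm => h (List.mem_cons_of_mem _ hm)
    rw [List.map_cons, ih ht]
    have : (p.1 == k) = false := beq_false_of_ne hk
    simp [this]

theorem dget_append_of_not_mem {ν : Type} (l1 l2 : List (String × ν)) (k : String) (dflt : ν)
    (h : k ∉ l1.map Prod.fst) :
    dget (l1 ++ l2) k dflt = dget l2 k dflt := by
  induction l1 with
  | nil => rfl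
  | cons p t ih =>
    obtain ⟨a, b⟩ := p
    rw [List.cons_append, dget_cons]
    have ha : a ≠ k := by
      intro e; exact h (by simp [e])
    have ht : k ∉ t.map Prod.fst := by
      intro hm; exact h (by simp [List.mem_map] at hm ⊢; tauto)
    simp [ha, ih ht]

theorem dset_dset_comm {ν : Type} (d : List (String × ν)) (k k' : String) (v v' : ν)
    (hne : k ≠ k') (hk : dhas d k = true) :
    dset (dset d k' v') k v = dset (dset d k v) k' v' := by
  have hkk' : (k' == k) = false := beq_false_of_ne (Ne.symm hne)
  by_cases h' : dhas d k' = true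
  · rw [dset_eq d k' v', if_pos h', dset_eq d k v, if_pos hk,
        dset_eq, if_pos (by rw [dhas_map_set]; exact hk),
        dset_eq, if_pos (by rw [dhas_map_set]; exact h')]
    simp only [List.map_map]
    apply List.map_congr_left
    intro p _
    obtain ⟨a, b⟩ := p
    simp only [Function.comp_def]
    by_cases hp : a = k'
    · subst hp
      simp [hkk']
    · by_cases hp2 : a = k
      · subst hp2
        simp [beq_false_of_ne hne]
      · simp [beq_false_of_ne hp, beq_false_of_ne hp2]
  · have h'f : dhas d k' = false := by simpa using h'
    rw [dset_eq d k' v', if_neg (by simp [h'f]), dset_eq d k v, if_pos hk,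
        dset_eq, if_pos (by rw [dhas_append, hk]; rfl),
        dset_eq, if_neg (by rw [dhas_map_set, h'f]; simp)]
    rw [List.map_append]
    simp [hkk']
    intro e
    exact absurd e (Ne.symm hne)

theorem keys_dset {ν : Type} (d : List (String × ν)) (k : String) (v : ν) :
    (dset d k v).map Prod.fst = if dhas d k then d.map Prod.fst else d.map Prod.fst ++ [k] := by
  rw [dset_eq]
  split_ifs with h
  · rw [List.map_map]
    apply List.map_congr_left
    intro p _
    obtain ⟨a, b⟩ := p
    simp only [Function.comp_def]
    by_cases hp : a = k
    · subst hp; simp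
    · simp [beq_false_of_ne hp]
  · simp

theorem nodup_keys_dset {ν : Type} (d : List (String × ν)) (k : String) (v : ν)
    (h : (d.map Prod.fst).Nodup) : ((dset d k v).map Prod.fst).Nodup := by
  rw [keys_dset]
  split_ifs with hc
  · exact h
  · have hk : k ∉ d.map Prod.fst := by
      intro hm
      rw [← dhas_iff_mem] at hm
      simp [hm] at hc
    refine List.Nodup.append h (List.nodup_singleton k) ?_
    intro a ha hb
    rw [List.mem_singleton] at hb
    subst hb
    exact hk ha

-- sorted(sorted(a) ++ b) = sorted(a ++ b)
theorem sorted_sorted_append (a b : List Int) :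
    PySem.List.sorted (PySem.List.sorted a (fun x => x) false ++ b) (fun x => x) false =
    PySem.List.sorted (a ++ b) (fun x => x) false := by
  apply PySem.List.sorted_eq_sorted_of_perm
  · exact fun x y h => h
  · exact (PySem.List.sorted_perm a (fun x => x) false).append (List.Perm.refl b)

-- abbreviations for a single merge step
def combineSub (x s : List (String × List Int)) : List (String × List Int) :=
  dset x "rssi" (dget x "rssi" [] ++ dget s "rssi" [])

def sortSub (x : List (String × List Int)) : List (String × List Int) :=
  dset x "rssi" (PySem.List.sorted (dget x "rssi" []) (fun x => x) false)

def bleG (ble : List (String × List (String × List Int))) (mac : String) (sub : List (String × List Int)) :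
    List (String × List (String × List Int)) :=
  dset ble mac (sortSub (if dhas ble mac = false then sub else combineSub (dget ble mac []) sub))

def stepM (fp : List (String × List (String × List (String × List Int)))) (mac : String)
    (sub : List (String × List Int)) : List (String × List (String × List (String × List Int))) :=
  dset fp "ble" (bleG (dget fp "ble" []) mac sub)

def aggIns (agg : List (String × List (String × List Int))) (mac : String) (sub : List (String × List Int)) :
    List (String × List (String × List Int)) :=
  if dhas agg mac = false then dset agg mac sub
  else dset agg mac (combineSub (dget agg mac []) sub)

-- the per-mac body of A's inner loop (and of B's apply loop) is stepM
theorem stepA_eq_stepM (fp : List (String × List (String × List (String × List Int)))) (mac : String)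
    (sub : List (String × List Int)) :
    (let fpble := dget fp "ble" []
     let fpble1 :=
       if dhas fpble mac = false then dset fpble mac sub
       else dset fpble mac (dset (dget fpble mac []) "rssi"
         (dget (dget fpble mac []) "rssi" [] ++ dget sub "rssi" []))
     let s := dget fpble1 mac []
     dset fp "ble" (dset fpble1 mac
       (dset s "rssi" (PySem.List.sorted (dget s "rssi" []) (fun x => x) false)))) = stepM fp mac sub := by
  by_cases h : dhas (dget fp "ble" []) mac = false <;>
    simp [stepM, bleG, sortSub, combineSub, h, dget_dset, dset_dset_self]

theorem combine_assoc (x s1 s2 : List (String × List Int)) :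
    combineSub (combineSub x s1) s2 = combineSub x (combineSub s1 s2) := by
  simp [combineSub, dget_dset, dset_dset_self, List.append_assoc]

theorem sortSub_combine (x s : List (String × List Int)) :
    sortSub (combineSub (sortSub x) s) = sortSub (combineSub x s) := by
  simp [sortSub, combineSub, dget_dset, dset_dset_self, sorted_sorted_append]

theorem bleG_bleG_self (b : List (String × List (String × List Int))) (m : String)
    (s1 s2 : List (String × List Int)) :
    bleG (bleG b m s1) m s2 = bleG b m (combineSub s1 s2) := by
  cases h : dhas b m with
  | false => simp [bleG, h, dhas_dset, dget_dset, dset_dset_self, sortSub_combine]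
  | true => simp [bleG, h, dhas_dset, dget_dset, dset_dset_self, sortSub_combine, combine_assoc]

theorem dhas_bleG (b : List (String × List (String × List Int))) (m m' : String)
    (s : List (String × List Int)) :
    dhas (bleG b m s) m' = (m' == m || dhas b m') := by
  simp [bleG, dhas_dset]

theorem bleG_bleG_comm (b : List (String × List (String × List Int))) (m1 m2 : String)
    (s1 s2 : List (String × List Int)) (hne : m1 ≠ m2) (h2 : dhas b m2 = true) :
    bleG (bleG b m1 s1) m2 s2 = bleG (bleG b m2 s2) m1 s1 := by
  have e1 : (m2 == m1) = false := beq_false_of_ne (Ne.symm hne)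
  have e2 : (m1 == m2) = false := beq_false_of_ne hne
  simp only [bleG, dhas_dset, dget_dset, e1, e2, h2, Bool.false_or,
    if_neg (Ne.symm hne), if_neg hne]
  simp only [Bool.true_eq_false, if_false]
  exact dset_dset_comm b m2 m1
    (sortSub (combineSub (dget b m2 []) s2))
    (sortSub (if dhas b m1 = false then s1 else combineSub (dget b m1 []) s1))
    (Ne.symm hne) h2

theorem dget_ble_stepM (fp : List (String × List (String × List (String × List Int)))) (m : String)
    (s : List (String × List Int)) :
    dget (stepM fp m s) "ble" [] = bleG (dget fp "ble" []) m s := by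
  rw [stepM, dget_dset, if_pos rfl]

theorem stepM_stepM_self (fp : List (String × List (String × List (String × List Int)))) (m : String)
    (s1 s2 : List (String × List Int)) :
    stepM (stepM fp m s1) m s2 = stepM fp m (combineSub s1 s2) := by
  show dset (stepM fp m s1) "ble" (bleG (dget (stepM fp m s1) "ble" []) m s2) = _
  rw [dget_ble_stepM, stepM, dset_dset_self, bleG_bleG_self]
  rfl

theorem stepM_stepM_comm (fp : List (String × List (String × List (String × List Int)))) (m1 m2 : String)
    (s1 s2 : List (String × List Int)) (hne : m1 ≠ m2)
    (h2 : dhas (dget fp "ble" []) m2 = true) :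
    stepM (stepM fp m1 s1) m2 s2 = stepM (stepM fp m2 s2) m1 s1 := by
  show dset (stepM fp m1 s1) "ble" (bleG (dget (stepM fp m1 s1) "ble" []) m2 s2) =
       dset (stepM fp m2 s2) "ble" (bleG (dget (stepM fp m2 s2) "ble" []) m1 s1)
  rw [dget_ble_stepM, dget_ble_stepM, stepM, stepM, dset_dset_self, dset_dset_self,
      bleG_bleG_comm _ _ _ _ _ hne h2]

theorem dhas_ble_stepM (fp : List (String × List (String × List (String × List Int)))) (m m' : String)
    (s : List (String × List Int)) :
    dhas (dget (stepM fp m s) "ble" []) m' = (m' == m || dhas (dget fp "ble" []) m') := by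
  rw [dget_ble_stepM, dhas_bleG]

theorem stepM_foldl (l : List (String × List (String × List Int)))
    (fp : List (String × List (String × List (String × List Int)))) (mac : String)
    (sub : List (String × List Int)) (hnm : mac ∉ l.map Prod.fst)
    (hp : dhas (dget fp "ble" []) mac = true) :
    stepM (l.foldl (fun r p => stepM r p.1 p.2) fp) mac sub =
    l.foldl (fun r p => stepM r p.1 p.2) (stepM fp mac sub) := by
  induction l generalizing fp with
  | nil => rfl
  | cons p l ih =>
    have hne : p.1 ≠ mac := by
      intro e; exact hnm (by simp [← e])
    have hnm' : mac ∉ l.map Prod.fst := by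
      intro hm; exact hnm (List.mem_cons_of_mem _ hm)
    have hp' : dhas (dget (stepM fp p.1 p.2) "ble" []) mac = true := by
      rw [dhas_ble_stepM, hp]; simp
    simp only [List.foldl_cons]
    rw [ih _ hnm' hp', stepM_stepM_comm fp p.1 mac p.2 sub hne hp]

theorem split_of_dhas {ν : Type} (d : List (String × ν)) (k : String)
    (hk : dhas d k = true) (hnd : (d.map Prod.fst).Nodup) :
    ∃ l1 v l2, d = l1 ++ (k, v) :: l2 ∧ k ∉ l1.map Prod.fst ∧ k ∉ l2.map Prod.fst := by
  have hm : k ∈ d.map Prod.fst := (dhas_iff_mem d k).mp hk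
  rcases List.mem_map.mp hm with ⟨p, hp, he⟩
  obtain ⟨pk, pv⟩ := p
  cases he
  rcases List.append_of_mem hp with ⟨l1, l2, rfl⟩
  refine ⟨l1, pv, l2, rfl, ?_, ?_⟩
  · rw [List.map_append, List.map_cons] at hnd
    rcases List.nodup_append.mp hnd with ⟨-, -, hdisj⟩
    intro hmem
    have hmem2 : (pk, pv).1 ∈ (pk, pv).1 :: l2.map Prod.fst := List.mem_cons_self ..
    exact hdisj _ hmem _ hmem2 rfl
  · rw [List.map_append, List.map_cons] at hnd
    rcases List.nodup_append.mp hnd with ⟨-, h2, -⟩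
    exact (List.nodup_cons.mp h2).1

theorem dset_split {ν : Type} (l1 l2 : List (String × ν)) (k : String) (w v : ν)
    (h1 : k ∉ l1.map Prod.fst) (h2 : k ∉ l2.map Prod.fst) :
    dset (l1 ++ (k, w) :: l2) k v = l1 ++ (k, v) :: l2 := by
  have hc : dhas (l1 ++ (k, w) :: l2) k = true := by
    rw [dhas_append, dhas_cons]; simp
  rw [dset_eq, if_pos hc, List.map_append, List.map_cons]
  rw [map_setfn_of_not_mem _ _ _ h1, map_setfn_of_not_mem _ _ _ h2]
  simp

theorem dget_split {ν : Type} (l1 l2 : List (String × ν)) (k : String) (w : ν) (dflt : ν)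
    (h1 : k ∉ l1.map Prod.fst) :
    dget (l1 ++ (k, w) :: l2) k dflt = w := by
  rw [dget_append_of_not_mem _ _ _ _ h1, dget_cons]; simp

theorem foldl_aggIns (agg : List (String × List (String × List Int))) (mac : String)
    (sub : List (String × List Int)) (fp : List (String × List (String × List (String × List Int))))
    (hnd : (agg.map Prod.fst).Nodup) :
    (aggIns agg mac sub).foldl (fun r p => stepM r p.1 p.2) fp =
    stepM (agg.foldl (fun r p => stepM r p.1 p.2) fp) mac sub := by
  by_cases h : dhas agg mac = false
  · rw [aggIns, if_pos h, dset_eq, if_neg (by simp [h])]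
    simp [List.foldl_append]
  · have h' : dhas agg mac = true := by simpa using h
    rcases split_of_dhas agg mac h' hnd with ⟨l1, s0, l2, rfl, hm1, hm2⟩
    rw [aggIns, if_neg (by simp [h']), dget_split _ _ _ _ _ hm1,
        dset_split _ _ _ _ _ hm1 hm2]
    simp only [List.foldl_append, List.foldl_cons]
    have hp : dhas (dget (stepM (l1.foldl (fun r p => stepM r p.1 p.2) fp) mac s0) "ble" []) mac = true := by
      rw [dhas_ble_stepM]; simp
    rw [stepM_foldl l2 _ mac sub hm2 hp, stepM_stepM_self]

theorem nodup_aggIns (agg : List (String × List (String × List Int))) (mac : String)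
    (sub : List (String × List Int)) (hnd : (agg.map Prod.fst).Nodup) :
    ((aggIns agg mac sub).map Prod.fst).Nodup := by
  rw [aggIns]
  split_ifs <;> exact nodup_keys_dset _ _ _ hnd

theorem inner_eq (f2 : List (String × List (String × List (String × List Int)))) (ks : List String)
    (agg : List (String × List (String × List Int)))
    (fp : List (String × List (String × List (String × List Int))))
    (hnd : (agg.map Prod.fst).Nodup) :
    (ks.foldl (fun agg mac => aggIns agg mac (dget (dget f2 "ble" []) mac [])) agg).foldl
        (fun r p => stepM r p.1 p.2) fp =
    ks.foldl (fun fp mac => stepM fp mac (dget (dget f2 "ble" []) mac []))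
        (agg.foldl (fun r p => stepM r p.1 p.2) fp) := by
  induction ks generalizing agg with
  | nil => rfl
  | cons m ks ih =>
    simp only [List.foldl_cons]
    rw [ih _ (nodup_aggIns _ _ _ hnd), foldl_aggIns _ _ _ _ hnd]

theorem nodup_foldl_aggIns (f2 : List (String × List (String × List (String × List Int))))
    (ks : List String) (agg : List (String × List (String × List Int)))
    (hnd : (agg.map Prod.fst).Nodup) :
    ((ks.foldl (fun agg mac => aggIns agg mac (dget (dget f2 "ble" []) mac [])) agg).map Prod.fst).Nodup := by
  induction ks generalizing agg with
  | nil => exact hnd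
  | cons m ks ih => exact ih _ (nodup_aggIns _ _ _ hnd)

theorem outer_eq (rest : List (List (String × List (String × List (String × List Int)))))
    (agg : List (String × List (String × List Int)))
    (f0 : List (String × List (String × List (String × List Int))))
    (hnd : (agg.map Prod.fst).Nodup) :
    (rest.foldl (fun agg f2 =>
        if dhas f2 "ble" = false then agg
        else (dkeys (dget f2 "ble" [])).foldl
          (fun agg mac => aggIns agg mac (dget (dget f2 "ble" []) mac [])) agg) agg).foldl
      (fun r p => stepM r p.1 p.2) f0 =
    rest.foldl (fun fp f2 =>
        if dhas f2 "ble" = false then fp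
        else (dkeys (dget f2 "ble" [])).foldl
          (fun fp mac => stepM fp mac (dget (dget f2 "ble" []) mac [])) fp)
      (agg.foldl (fun r p => stepM r p.1 p.2) f0) := by
  induction rest generalizing agg with
  | nil => rfl
  | cons f2 rest ih =>
    simp only [List.foldl_cons]
    by_cases h : dhas f2 "ble" = false
    · rw [if_pos h, if_pos h, ih _ hnd]
    · rw [if_neg h, if_neg h, ih _ (nodup_foldl_aggIns _ _ _ hnd),
          inner_eq _ _ _ _ hnd]

theorem portA_unfold (f0 f1 : List (String × List (String × List (String × List Int))))
    (r : List (List (String × List (String × List (String × List Int))))) :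
    merge_fingerprints_ble (f0 :: f1 :: r) =
    (f1 :: r).foldl (fun fp f2 =>
        if dhas f2 "ble" = false then fp
        else (dkeys (dget f2 "ble" [])).foldl
          (fun fp mac => stepM fp mac (dget (dget f2 "ble" []) mac [])) fp) f0 := by
  show (f1 :: r).foldl (fun fp f2 =>
      if dhas f2 "ble" = false then fp
      else
        (dkeys (dget f2 "ble" [])).foldl (fun fp mac =>
          let fpble := dget fp "ble" []
          let fpble1 :=
            if dhas fpble mac = false then
              dset fpble mac (dget (dget f2 "ble" []) mac [])
            else
              dset fpble mac
                (dset (dget fpble mac []) "rssi"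
                  (dget (dget fpble mac []) "rssi" [] ++
                   dget (dget (dget f2 "ble" []) mac []) "rssi" []))
          let sub := dget fpble1 mac []
          let fpble2 := dset fpble1 mac
            (dset sub "rssi" (PySem.List.sorted (dget sub "rssi" []) (fun x => x) false))
          dset fp "ble" fpble2) fp) f0 = _
  congr 1
  funext fp f2
  by_cases h : dhas f2 "ble" = false
  · rw [if_pos h, if_pos h]
  · rw [if_neg h, if_neg h]
    congr 1
    funext fp mac
    exact stepA_eq_stepM fp mac (dget (dget f2 "ble" []) mac [])

theorem portB_unfold (f0 f1 : List (String × List (String × List (String × List Int))))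
    (r : List (List (String × List (String × List (String × List Int))))) :
    merge_fingerprints_ble_alt (f0 :: f1 :: r) =
    ((f1 :: r).foldl (fun agg f2 =>
        if dhas f2 "ble" = false then agg
        else (dkeys (dget f2 "ble" [])).foldl
          (fun agg mac => aggIns agg mac (dget (dget f2 "ble" []) mac [])) agg) []).foldl
      (fun res p => stepM res p.1 p.2) f0 := by
  show ((f1 :: r).foldl (fun agg f2 =>
      if dhas f2 "ble" = false then agg
      else (dkeys (dget f2 "ble" [])).foldl
        (fun agg mac => aggIns agg mac (dget (dget f2 "ble" []) mac [])) agg) []).foldl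
    (fun res p =>
      let rble := dget res "ble" []
      let rble1 :=
        if dhas rble p.1 = false then dset rble p.1 p.2
        else dset rble p.1
          (dset (dget rble p.1 []) "rssi"
            (dget (dget rble p.1 []) "rssi" [] ++ dget p.2 "rssi" []))
      let sub := dget rble1 p.1 []
      dset res "ble" (dset rble1 p.1
        (dset sub "rssi" (PySem.List.sorted (dget sub "rssi" []) (fun x => x) false)))) f0 = _
  congr 1
  funext res p
  exact stepA_eq_stepM res p.1 p.2

theorem ports_eq (flist : List (List (String × List (String × List (String × List Int))))) :
    merge_fingerprints_ble flist = merge_fingerprints_ble_alt flist := by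
  match flist with
  | [] => rfl
  | [f0] => rfl
  | f0 :: f1 :: r =>
    rw [portA_unfold, portB_unfold]
    exact (outer_eq (f1 :: r) [] f0 (by simp)).symm

-- ===== VERDICT (by name: the statement is the Claim_ definition above) =====
theorem merge_fingerprints_ble_spec : Claim_equal_merge_fingerprints_ble := by
  intro flist _ _
  show merge_fingerprints_ble flist = merge_fingerprints_ble_alt flist
  exact ports_eq flist
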